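-- pv_equiv track=rewrite | github.com/kiung22/algorithm-problem-solving | Programmers/level2/전력망을둘로나누기.py | solution
-- ===== SOURCE A (Python) =====
-- def solution(n, wires):
--     adj = [[] for _ in range(n+1)]
--     for u, v in wires:
--         adj[u].append(v)
--         adj[v].append(u)
--
--     child_count = [0 for _ in range(n+1)]
--     visited = [0] * (n+1)
--
--     def f(v):
--         child = []
--         for u in adj[v]:
--             if visited[u] == 0:
--                 visited[u] = 1
--                 child.append(u)
--                 f(u)
--         count = 1 + sum(child_count[i] for i in child)
--         child_count[v] = count
--         return
--
--     visited[1] = 1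
--     f(1)
--
--     answer = n
--     for i in child_count:
--         answer = min(answer, abs(n - 2*i))
--     return answer
-- ===== SOURCE B (Python) =====
-- def solution(n, wires):
--     adj = [[] for _ in range(n + 1)]
--     for u, v in wires:
--         adj[u].append(v)
--         adj[v].append(u)
--
--     size = [0] * (n + 1)
--     visited = [0] * (n + 1)
--     visited[1] = 1
--     # iterative DFS: explicit stack of frames (node, next-neighbour index, children found)
--     stack = [(1, 0, [])]
--     while stack:
--         v, i, children = stack.pop()
--         if i < len(adj[v]):
--             u = adj[v][i]
--             if visited[u] == 0:
--                 visited[u] = 1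
--                 children.append(u)
--                 stack.append((v, i + 1, children))
--                 stack.append((u, 0, []))
--             else:
--                 stack.append((v, i + 1, children))
--         else:
--             size[v] = 1 + sum(size[c] for c in children)
--
--     answer = n
--     for s in size:
--         answer = min(answer, abs(n - 2 * s))
--     return answer
-- ===== Notes on version B (the rewrite author's own statement) =====
-- stated objective: alternative
-- what changed: The recursive DFS (nested recursion inside each node's neighbour loop, deferred generator sum of child sizes) is replaced by an iterative explicit-stack DFS whose frames carry (node, next-neighbour index, children found so far); same adjacency build and final min scan.
import Mathlib
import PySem

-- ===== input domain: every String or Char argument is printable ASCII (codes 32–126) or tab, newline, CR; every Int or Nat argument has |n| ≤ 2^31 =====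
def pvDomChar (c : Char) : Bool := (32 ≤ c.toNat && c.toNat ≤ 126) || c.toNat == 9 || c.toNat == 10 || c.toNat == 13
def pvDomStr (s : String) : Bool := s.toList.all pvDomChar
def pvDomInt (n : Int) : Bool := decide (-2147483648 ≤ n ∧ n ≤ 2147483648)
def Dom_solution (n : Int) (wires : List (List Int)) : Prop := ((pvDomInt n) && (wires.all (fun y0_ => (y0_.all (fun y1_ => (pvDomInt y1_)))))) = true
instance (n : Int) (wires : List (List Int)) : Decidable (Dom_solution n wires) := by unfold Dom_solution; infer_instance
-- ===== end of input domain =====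

-- B replaces A's recursive DFS by an iterative explicit-stack DFS with (node, index, children) frames;
-- same adjacency build, same subtree sizes, same final min scan. Equivalence of the return value is proved on Pre_.

-- ===== PORT A =====
-- shared helper: both Pythons build the adjacency list with the identical loop
def pvAddWire (adj : List (List Int)) (w : List Int) : List (List Int) :=
  match w with
  | [u, v] =>
    let adj1 := PySem.List.pySetD adj u (PySem.List.pyGetD adj u [] ++ [v])
    PySem.List.pySetD adj1 v (PySem.List.pyGetD adj1 v [] ++ [u])
  | _ => adj

def pvBuildAdj (n : Int) (wires : List (List Int)) : List (List Int) :=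
  wires.foldl pvAddWire (List.replicate (n + 1).toNat [])

-- shared helper: both Pythons run `size[v] = 1 + sum(size[c] for c in children)` on the same state
def pvWb (v : Int) (out : (List Int × List Int) × List Int) : List Int × List Int :=
  (out.1.1, PySem.List.pySetD out.1.2 v
    (1 + out.2.foldl (fun s c => s + PySem.List.pyGetD out.1.2 c 0) 0))

-- A's recursive `f` (fuel is only a totality guard; under Pre_ it never runs out)
mutual
def pvFA (adj : List (List Int)) : Nat → Int → List Int × List Int → Option (List Int × List Int)
  | 0, _, _ => none
  | fuel + 1, v, st =>
    match pvLoopA adj fuel (PySem.List.pyGetD adj v []) st [] with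
    | none => none
    | some out => some (pvWb v out)
  termination_by fuel v st => (fuel, 0)

def pvLoopA (adj : List (List Int)) : Nat → List Int → List Int × List Int → List Int → Option ((List Int × List Int) × List Int)
  | _, [], st, child => some (st, child)
  | fuel, u :: us, st, child =>
    if PySem.List.pyGetD st.1 u 0 = 0 then
      match pvFA adj fuel u (PySem.List.pySetD st.1 u 1, st.2) with
      | none => none
      | some st' => pvLoopA adj fuel us st' (child ++ [u])
    else
      pvLoopA adj fuel us st child
  termination_by fuel us st child => (fuel, us.length + 1)
end

def solution (n : Int) (wires : List (List Int)) : Int :=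
  let adj := pvBuildAdj n wires
  let child_count := List.replicate (n + 1).toNat (0 : Int)
  let visited := PySem.List.pySetD (List.replicate (n + 1).toNat (0 : Int)) 1 1
  match pvFA adj (n.toNat + 2) 1 (visited, child_count) with
  | none => 0
  | some st => st.2.foldl (fun answer i => min answer |n - 2 * i|) n

-- ===== PORT B =====
-- B's while-loop over the explicit stack (fuel is only a totality guard; under Pre_ it never runs out)
def pvRunB (adj : List (List Int)) : Nat → List (Int × Int × List Int) → List Int × List Int → Option (List Int × List Int)
  | _, [], st => some st
  | 0, _ :: _, _ => none
  | fuel + 1, (v, i, children) :: rest, st =>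
    let av := PySem.List.pyGetD adj v []
    if i < (av.length : Int) then
      let u := PySem.List.pyGetD av i 0
      if PySem.List.pyGetD st.1 u 0 = 0 then
        pvRunB adj fuel ((u, 0, []) :: (v, i + 1, children ++ [u]) :: rest) (PySem.List.pySetD st.1 u 1, st.2)
      else
        pvRunB adj fuel ((v, i + 1, children) :: rest) st
    else
      pvRunB adj fuel rest (pvWb v (st, children))

def solution_alt (n : Int) (wires : List (List Int)) : Int :=
  let adj := pvBuildAdj n wires
  let size := List.replicate (n + 1).toNat (0 : Int)
  let visited := PySem.List.pySetD (List.replicate (n + 1).toNat (0 : Int)) 1 1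
  match pvRunB adj ((2 * wires.length + 3) ^ (n.toNat + 4)) [(1, 0, [])] (visited, size) with
  | none => 0
  | some st => st.2.foldl (fun answer s => min answer |n - 2 * s|) n

-- ===== PRECONDITION & SPEC =====
-- Pre_ excludes exactly the inputs on which the Python A raises: n ≤ 0 (IndexError on visited[1]),
-- a wire that is not a pair (ValueError on unpacking), or an endpoint outside [-(n+1), n] (IndexError).
def Pre_solution (n : Int) (wires : List (List Int)) : Prop :=
  1 ≤ n ∧ ∀ w ∈ wires, w.length = 2 ∧ ∀ x ∈ w, -(n + 1) ≤ x ∧ x ≤ n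
instance (n : Int) (wires : List (List Int)) : Decidable (Pre_solution n wires) := by
  unfold Pre_solution; infer_instance

def pvWitness_solution : Int × List (List Int) := (4, [[1, 2], [2, 3], [1, 4]])

def Spec_solution (n : Int) (wires : List (List Int)) (out : Int) : Prop := out = solution_alt n wires
instance (n : Int) (wires : List (List Int)) (out : Int) : Decidable (Spec_solution n wires out) := by
  unfold Spec_solution; infer_instance

-- ===== CLAIM (what is proved, stated in full; the proofs are below) =====
def Claim_equal_solution : Prop := ∀ (n : Int) (wires : List (List Int)), Dom_solution n wires → Pre_solution n wires → Spec_solution n wires (solution n wires)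

-- ===== LEMMAS AND PROOFS =====

-- membership in a python-set list
theorem pvMem_pySetD {xs : List (List Int)} {i : Int} {v l : List Int}
    (h : l ∈ PySem.List.pySetD xs i v) : l ∈ xs ∨ l = v := by
  unfold PySem.List.pySetD PySem.List.pySet? at h
  cases hk : PySem.List.pyIdx? xs.length i with
  | none => rw [hk] at h; exact Or.inl h
  | some k => rw [hk] at h; exact List.mem_or_eq_of_mem_set h

-- a pyGetD list is a member or the default
theorem pvGetD_mem_or {xs : List (List Int)} {i : Int} :
    PySem.List.pyGetD xs i [] ∈ xs ∨ PySem.List.pyGetD xs i [] = [] := by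
  unfold PySem.List.pyGetD PySem.List.pyGet?
  cases hk : PySem.List.pyIdx? xs.length i with
  | none => simp
  | some k =>
    cases hg : xs[k]? with
    | none => simp [hg]
    | some l => simp [hg]; exact Or.inl (List.mem_of_getElem? hg)

-- index resolution under InRange
theorem pvIdx_some {L : Nat} {i : Int} (h : PySem.Raise.InRange L i) :
    ∃ k, PySem.List.pyIdx? L i = some k ∧ k < L := by
  obtain ⟨h1, h2⟩ := h
  unfold PySem.List.pyIdx?
  by_cases h0 : 0 ≤ i
  · exact ⟨i.toNat, by simp [h0, h2], by omega⟩
  · refine ⟨L - (-i).toNat, by simp [h0, h1], by omega⟩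

-- marking a fresh node removes exactly one zero from visited
theorem pvCount_mark {vis : List Int} {u : Int} (hin : PySem.Raise.InRange vis.length u)
    (h0 : PySem.List.pyGetD vis u 0 = 0) :
    (PySem.List.pySetD vis u 1).count 0 + 1 = vis.count 0 ∧
    (PySem.List.pySetD vis u 1).length = vis.length := by
  obtain ⟨k, hk, hkL⟩ := pvIdx_some hin
  have hget : vis[k] = 0 := by
    unfold PySem.List.pyGetD PySem.List.pyGet? at h0
    rw [hk] at h0
    simp [List.getElem?_eq_getElem hkL] at h0
    exact h0
  have hset : PySem.List.pySetD vis u 1 = vis.set k 1 := by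
    unfold PySem.List.pySetD PySem.List.pySet?; rw [hk]; rfl
  constructor
  · rw [hset, List.count_set hkL]
    have hc : 1 ≤ vis.count 0 := List.one_le_count_iff.mpr (hget ▸ List.getElem_mem hkL)
    simp [hget]
    omega
  · rw [hset]; simp

-- ===== fuel sufficiency for A's recursion =====
mutual
theorem pvSuffA (adj : List (List Int)) (L : Nat)
    (hadj : ∀ l ∈ adj, ∀ u ∈ l, PySem.Raise.InRange L u)
    (fuel : Nat) (v : Int) (st : List Int × List Int)
    (hL : st.1.length = L) (hf : st.1.count 0 < fuel) :
    ∃ st', pvFA adj fuel v st = some st' ∧ st'.1.length = L ∧ st'.1.count 0 ≤ st.1.count 0 := by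
  match fuel with
  | 0 => omega
  | fuel + 1 =>
    have hus : ∀ u ∈ PySem.List.pyGetD adj v [], PySem.Raise.InRange L u := by
      rcases pvGetD_mem_or (xs := adj) (i := v) with h | h
      · exact hadj _ h
      · rw [h]; intro u hu; simp at hu
    obtain ⟨st', ch', heq, hL', hc'⟩ :=
      pvSuffLoop adj L hadj fuel (PySem.List.pyGetD adj v []) st [] hL hus (by omega)
    exact ⟨pvWb v (st', ch'), by simp [pvFA, heq], by simpa [pvWb] using hL', by simpa [pvWb] using hc'⟩
  termination_by (fuel, 0)

theorem pvSuffLoop (adj : List (List Int)) (L : Nat)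
    (hadj : ∀ l ∈ adj, ∀ u ∈ l, PySem.Raise.InRange L u)
    (fuel : Nat) (us : List Int) (st : List Int × List Int) (child : List Int)
    (hL : st.1.length = L) (hus : ∀ u ∈ us, PySem.Raise.InRange L u) (hf : st.1.count 0 ≤ fuel) :
    ∃ st' ch', pvLoopA adj fuel us st child = some (st', ch') ∧ st'.1.length = L ∧
      st'.1.count 0 ≤ st.1.count 0 := by
  match us with
  | [] => exact ⟨st, child, by simp [pvLoopA], hL, le_refl _⟩
  | u :: us =>
    by_cases h0 : PySem.List.pyGetD st.1 u 0 = 0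
    · have hin : PySem.Raise.InRange st.1.length u := hL ▸ hus u (by simp)
      obtain ⟨hcnt, hlen⟩ := pvCount_mark hin h0
      have hmark : (PySem.List.pySetD st.1 u 1, st.2).1.count 0 < fuel := by
        simp only []; omega
      obtain ⟨st1, heq1, hL1, hc1⟩ :=
        pvSuffA adj L hadj fuel u (PySem.List.pySetD st.1 u 1, st.2) (by simp only []; omega) hmark
      obtain ⟨st2, ch2, heq2, hL2, hc2⟩ :=
        pvSuffLoop adj L hadj fuel us st1 (child ++ [u]) hL1
          (fun x hx => hus x (by simp [hx])) (by simp only [] at hc1 ⊢; omega)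
      refine ⟨st2, ch2, ?_, hL2, ?_⟩
      · simp [pvLoopA, h0, heq1, heq2]
      · simp only [] at hc1 hc2 ⊢; omega
    · obtain ⟨st2, ch2, heq2, hL2, hc2⟩ :=
        pvSuffLoop adj L hadj fuel us st child hL (fun x hx => hus x (by simp [hx])) hf
      exact ⟨st2, ch2, by simp [pvLoopA, h0, heq2], hL2, hc2⟩
  termination_by (fuel, us.length + 1)
end

-- ===== fuel monotonicity for B's machine =====
theorem pvRunB_mono (adj : List (List Int)) :
    ∀ (fuel : Nat) (stack : List (Int × Int × List Int)) (st r : List Int × List Int),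
    pvRunB adj fuel stack st = some r → pvRunB adj (fuel + 1) stack st = some r := by
  intro fuel
  induction fuel with
  | zero =>
    intro stack st r h
    match stack with
    | [] => simpa [pvRunB] using h
    | _ :: _ => simp [pvRunB] at h
  | succ fuel ih =>
    intro stack st r h
    match stack with
    | [] => simpa [pvRunB] using h
    | (v, i, children) :: rest =>
      rw [pvRunB] at h ⊢
      dsimp only at h ⊢
      split_ifs at h ⊢ <;> exact ih _ _ _ h

theorem pvRunB_mono_le (adj : List (List Int)) {k K : Nat}
    (hle : k ≤ K) {stack : List (Int × Int × List Int)} {st r : List Int × List Int}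
    (h : pvRunB adj k stack st = some r) : pvRunB adj K stack st = some r := by
  induction K with
  | zero => have : k = 0 := by omega
            exact this ▸ h
  | succ K ih =>
    rcases Nat.lt_or_ge k (K + 1) with hk | hk
    · exact pvRunB_mono adj K stack st r (ih (by omega))
    · have : k = K + 1 := by omega
      exact this ▸ h

-- ===== simulation: the stack machine retraces A's recursion =====
theorem pvSim (adj : List (List Int)) (Wa : Nat) (hW : ∀ l ∈ adj, l.length ≤ Wa)
    (fuel : Nat) (us : List Int) (st : List Int × List Int) (child : List Int)
    (out : (List Int × List Int) × List Int)
    (heq : pvLoopA adj fuel us st child = some out)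
    (v i : Int) (rest : List (Int × Int × List Int)) (hi : 0 ≤ i)
    (hdrop : (PySem.List.pyGetD adj v []).drop i.toNat = us) :
    ∃ k ≤ (us.length + 1) * (Wa + 3) ^ fuel, ∀ F,
      pvRunB adj (k + F) ((v, i, child) :: rest) st = pvRunB adj F rest (pvWb v out) := by
  have hX : 1 ≤ (Wa + 3) ^ fuel := Nat.one_le_pow _ _ (by omega)
  match us, heq with
  | [], heq =>
    have hout : (st, child) = out := by simpa [pvLoopA] using heq
    have hlen : ((PySem.List.pyGetD adj v []).length : Int) ≤ i := by
      have h1 := congrArg List.length hdrop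
      simp only [List.length_drop, List.length_nil] at h1
      omega
    refine ⟨1, by simpa using hX, fun F => ?_⟩
    rw [show 1 + F = F + 1 by omega, pvRunB]
    dsimp only
    rw [if_neg (by omega), hout]
  | u :: us', heq =>
    have hlt : i.toNat < (PySem.List.pyGetD adj v []).length := by
      have h1 := congrArg List.length hdrop
      simp only [List.length_drop, List.length_cons] at h1
      omega
    have hltI : i < ((PySem.List.pyGetD adj v []).length : Int) := by omega
    have hgetu : PySem.List.pyGetD (PySem.List.pyGetD adj v []) i 0 = u := by
      rw [PySem.List.pyGetD_eq_getElem _ _ hi (by exact_mod_cast hltI)]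
      have h2 : (List.drop i.toNat (PySem.List.pyGetD adj v []))[0]'(by rw [hdrop]; simp) = u := by
        simp [hdrop]
      rw [List.getElem_drop] at h2
      simpa using h2
    have hdrop' : (PySem.List.pyGetD adj v []).drop (i + 1).toNat = us' := by
      rw [show (i + 1).toNat = i.toNat + 1 by omega, ← List.tail_drop, hdrop]
      rfl
    by_cases h0 : PySem.List.pyGetD st.1 u 0 = 0
    · -- fresh node: A recursed here; the machine pushes a new frame
      cases hFA : pvFA adj fuel u (PySem.List.pySetD st.1 u 1, st.2) with
      | none => rw [pvLoopA, if_pos h0, hFA] at heq; exact absurd heq (by simp)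
      | some st1 =>
        have hloop2 : pvLoopA adj fuel us' st1 (child ++ [u]) = some out := by
          rw [pvLoopA, if_pos h0, hFA] at heq; exact heq
        match fuel, hFA with
        | f + 1, hFA =>
          cases hinner : pvLoopA adj f (PySem.List.pyGetD adj u []) (PySem.List.pySetD st.1 u 1, st.2) [] with
          | none => rw [pvFA, hinner] at hFA; exact absurd hFA (by simp)
          | some outu =>
            have hst1 : pvWb u outu = st1 := by
              rw [pvFA, hinner] at hFA; simpa using hFA
            obtain ⟨k1, hk1, h1⟩ := pvSim adj Wa hW f (PySem.List.pyGetD adj u [])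
              (PySem.List.pySetD st.1 u 1, st.2) [] outu hinner u 0
              ((v, i + 1, child ++ [u]) :: rest) (by omega) (by simp)
            obtain ⟨k2, hk2, h2⟩ := pvSim adj Wa hW (f + 1) us' st1 (child ++ [u]) out hloop2
              v (i + 1) rest (by omega) hdrop'
            have hau : (PySem.List.pyGetD adj u []).length ≤ Wa := by
              rcases pvGetD_mem_or (xs := adj) (i := u) with h | h
              · exact hW _ h
              · rw [h]; simp
            refine ⟨1 + k1 + k2, ?_, fun F => ?_⟩
            · have hXf : 1 ≤ (Wa + 3) ^ f := Nat.one_le_pow _ _ (by omega)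
              have e1 : k1 ≤ (Wa + 1) * (Wa + 3) ^ f := le_trans hk1 (by
                have : (PySem.List.pyGetD adj u []).length + 1 ≤ Wa + 1 := by omega
                exact Nat.mul_le_mul_right _ this)
              have e2 : (Wa + 3) ^ (f + 1) = (Wa + 3) * (Wa + 3) ^ f := by ring
              simp only [List.length_cons]
              nlinarith [hk2]
            · rw [show 1 + k1 + k2 + F = (k1 + (k2 + F)) + 1 by omega, pvRunB]
              dsimp only
              rw [if_pos hltI, hgetu, if_pos h0, h1 (k2 + F), hst1, h2 F]
        | 0, hFA => rw [pvFA] at hFA; exact absurd hFA (by simp)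
    · -- already visited: both sides just advance
      have hloop2 : pvLoopA adj fuel us' st child = some out := by
        rw [pvLoopA, if_neg h0] at heq; exact heq
      obtain ⟨k2, hk2, h2⟩ := pvSim adj Wa hW fuel us' st child out hloop2 v (i + 1) rest
        (by omega) hdrop'
      refine ⟨k2 + 1, ?_, fun F => ?_⟩
      · simp only [List.length_cons]
        nlinarith [hk2]
      · rw [show k2 + 1 + F = (k2 + F) + 1 by omega, pvRunB]
        dsimp only
        rw [if_pos hltI, hgetu, if_neg h0, h2 F]
  termination_by (fuel, us.length)

-- ===== glue lemmas about the build =====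
theorem pvSetAppend_inrange {L : Nat} {adj : List (List Int)} {z y : Int}
    (hadj : ∀ l ∈ adj, ∀ u ∈ l, PySem.Raise.InRange L u) (hy : PySem.Raise.InRange L y) :
    ∀ l ∈ PySem.List.pySetD adj z (PySem.List.pyGetD adj z [] ++ [y]), ∀ u ∈ l,
      PySem.Raise.InRange L u := by
  intro l hl x hx
  rcases pvMem_pySetD hl with h | h
  · exact hadj l h x hx
  · subst h
    rcases List.mem_append.mp hx with h | h
    · rcases pvGetD_mem_or (xs := adj) (i := z) with hg | hg
      · exact hadj _ hg x h
      · rw [hg] at h; simp at h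
    · simp at h; subst h; exact hy

theorem pvBuildAdj_inrange (n : Int) (wires : List (List Int)) (hpre : Pre_solution n wires) :
    ∀ l ∈ pvBuildAdj n wires, ∀ u ∈ l, PySem.Raise.InRange (n + 1).toNat u := by
  obtain ⟨hn, hw⟩ := hpre
  unfold pvBuildAdj
  suffices h : ∀ (ws : List (List Int)) (init : List (List Int)),
      (∀ w ∈ ws, ∀ x ∈ w, -(n + 1) ≤ x ∧ x ≤ n) →
      (∀ l ∈ init, ∀ u ∈ l, PySem.Raise.InRange (n + 1).toNat u) →
      ∀ l ∈ ws.foldl pvAddWire init, ∀ u ∈ l, PySem.Raise.InRange (n + 1).toNat u by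
    refine h wires _ (fun w hww => (hw w hww).2) ?_
    intro l hl u hu
    rw [List.eq_of_mem_replicate hl] at hu
    simp at hu
  intro ws
  induction ws with
  | nil => intro init _ hinit; exact hinit
  | cons w ws ih =>
    intro init hws hinit
    rw [List.foldl_cons]
    refine ih _ (fun w' hw' => hws w' (by simp [hw'])) ?_
    have hir : ∀ x : Int, -(n + 1) ≤ x ∧ x ≤ n → PySem.Raise.InRange (n + 1).toNat x := by
      intro x h1; exact ⟨by omega, by omega⟩
    rcases w with _ | ⟨u, _ | ⟨v, _ | ⟨a, t⟩⟩⟩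
    · simpa [pvAddWire] using hinit
    · simpa [pvAddWire] using hinit
    · have hu := hir u (hws [u, v] (by simp) u (by simp))
      have hv := hir v (hws [u, v] (by simp) v (by simp))
      simp only [pvAddWire]
      exact pvSetAppend_inrange (pvSetAppend_inrange hinit hv) hu
    · simpa [pvAddWire] using hinit

theorem pvSetAppend_width {c : Nat} {adj : List (List Int)} {z y : Int}
    (hadj : ∀ l ∈ adj, l.length ≤ c) :
    ∀ l ∈ PySem.List.pySetD adj z (PySem.List.pyGetD adj z [] ++ [y]), l.length ≤ c + 1 := by
  intro l hl
  rcases pvMem_pySetD hl with h | h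
  · exact le_trans (hadj l h) (by omega)
  · subst h
    rcases pvGetD_mem_or (xs := adj) (i := z) with hg | hg
    · simp only [List.length_append, List.length_cons, List.length_nil]
      have := hadj _ hg; omega
    · rw [hg]; simp

theorem pvBuildAdj_width (n : Int) (wires : List (List Int)) :
    ∀ l ∈ pvBuildAdj n wires, l.length ≤ 2 * wires.length := by
  unfold pvBuildAdj
  suffices h : ∀ (ws : List (List Int)) (init : List (List Int)) (c : Nat),
      (∀ l ∈ init, l.length ≤ c) →
      ∀ l ∈ ws.foldl pvAddWire init, l.length ≤ c + 2 * ws.length by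
    intro l hl
    have := h wires _ 0 (by intro l' hl'; rw [List.eq_of_mem_replicate hl']; simp) l hl
    omega
  intro ws
  induction ws with
  | nil => intro init c hinit; simpa using hinit
  | cons w ws ih =>
    intro init c hinit l hl
    rw [List.foldl_cons] at hl
    have hstep : ∀ l' ∈ pvAddWire init w, l'.length ≤ c + 2 := by
      unfold pvAddWire
      split
      · exact pvSetAppend_width (pvSetAppend_width hinit)
      · intro l' hl'; exact le_trans (hinit l' hl') (by omega)
    have := ih (pvAddWire init w) (c + 2) hstep l hl
    simp only [List.length_cons] at this ⊢
    omega

-- ===== VERDICT (by name: the statement is the Claim_ definition above) =====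
theorem solution_spec : Claim_equal_solution := by
  unfold Claim_equal_solution
  intro n wires _hdom hpre
  unfold Spec_solution
  obtain ⟨hn, hwires⟩ := hpre
  have hinr := pvBuildAdj_inrange n wires ⟨hn, hwires⟩
  have hwid := pvBuildAdj_width n wires
  -- the initial visited list: length and zero count
  have hin1 : PySem.Raise.InRange (List.replicate (n + 1).toNat (0 : Int)).length 1 := by
    refine ⟨?_, ?_⟩ <;> simp <;> omega
  have hget1 : PySem.List.pyGetD (List.replicate (n + 1).toNat (0 : Int)) 1 (0 : Int) = 0 := by
    rw [PySem.List.pyGetD_eq_getElem _ _ (by omega) (by simp; omega)]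
    simp
  obtain ⟨hcnt, hlenv⟩ := pvCount_mark hin1 hget1
  rw [List.count_replicate] at hcnt
  simp only [List.length_replicate] at hlenv
  -- A's recursion terminates within its fuel
  obtain ⟨st', hFA, _, _⟩ := pvSuffA (pvBuildAdj n wires) (n + 1).toNat hinr (n.toNat + 2) 1
    (PySem.List.pySetD (List.replicate (n + 1).toNat (0 : Int)) 1 1,
      List.replicate (n + 1).toNat (0 : Int))
    (by simp only []; exact hlenv) (by simp only [] at hcnt ⊢; simp at hcnt; omega)
  have hsolA : solution n wires = st'.2.foldl (fun answer i => min answer |n - 2 * i|) n := by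
    simp only [solution]
    rw [hFA]
  -- peel A's top call into its loop, then simulate it on B's machine
  rw [show n.toNat + 2 = n.toNat + 1 + 1 by omega] at hFA
  cases hloop : pvLoopA (pvBuildAdj n wires) (n.toNat + 1)
      (PySem.List.pyGetD (pvBuildAdj n wires) 1 [])
      (PySem.List.pySetD (List.replicate (n + 1).toNat (0 : Int)) 1 1,
        List.replicate (n + 1).toNat (0 : Int)) [] with
  | none => simp only [pvFA, hloop] at hFA; exact absurd hFA (by simp)
  | some out =>
    simp only [pvFA, hloop, Option.some.injEq] at hFA
    obtain ⟨k, hk, hrun⟩ := pvSim (pvBuildAdj n wires) (2 * wires.length) hwid (n.toNat + 1)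
      (PySem.List.pyGetD (pvBuildAdj n wires) 1 [])
      (PySem.List.pySetD (List.replicate (n + 1).toNat (0 : Int)) 1 1,
        List.replicate (n + 1).toNat (0 : Int)) [] out hloop 1 0 [] (le_refl 0) (by simp)
    have hrun0 := hrun 0
    rw [Nat.add_zero] at hrun0
    simp only [pvRunB] at hrun0
    have hlen1 : (PySem.List.pyGetD (pvBuildAdj n wires) 1 ([] : List Int)).length ≤
        2 * wires.length := by
      rcases pvGetD_mem_or (xs := pvBuildAdj n wires) (i := 1) with h | h
      · exact hwid _ h
      · rw [h]; simp
    have hkB : k ≤ (2 * wires.length + 3) ^ (n.toNat + 4) := by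
      calc k ≤ ((PySem.List.pyGetD (pvBuildAdj n wires) 1 ([] : List Int)).length + 1) *
              (2 * wires.length + 3) ^ (n.toNat + 1) := hk
        _ ≤ (2 * wires.length + 3) * (2 * wires.length + 3) ^ (n.toNat + 1) :=
              Nat.mul_le_mul_right _ (by omega)
        _ = (2 * wires.length + 3) ^ (n.toNat + 2) := by ring
        _ ≤ (2 * wires.length + 3) ^ (n.toNat + 4) := Nat.pow_le_pow_right (by omega) (by omega)
    have hrunB := pvRunB_mono_le (pvBuildAdj n wires) hkB hrun0
    rw [hsolA]
    simp only [solution_alt]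
    rw [hrunB, ← hFA]
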